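-- pv_equiv track=rewrite | github.com/markram4/AIO_paper | random_forest_classifications/gen_features.py | Counting_tri
-- ===== SOURCE A (Python) =====
-- from itertools import product
--
-- def Counting_tri(seq):
--     sequence = seq
--     tri_nucleotides = [''.join(x) for x in product('ACGT', repeat=3)] # Generate all possible tri-nucleotides
--     tri_count = {tri: 0 for tri in tri_nucleotides} # Initialize dictionary with all tri-nucleotides
--
--     for i in range(len(sequence) - 2):
--         tri = sequence[i:i+3].upper() # Extract current tri-nucleotide
--         if tri in tri_count:
--             tri_count[tri] += 1 # Increment count if tri-nucleotide is valid
--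
--
--     return tri_count
-- ===== SOURCE B (Python) =====
-- from itertools import product
--
-- def Counting_tri(seq):
--     # Uppercase once, materialize the overlapping length-3 windows,
--     # then answer each of the 64 canonical keys by a full scan (list.count):
--     # no counting dict is maintained at all.
--     S = seq.upper()
--     windows = [S[i:i+3] for i in range(len(S) - 2)]
--     return {''.join(t): windows.count(''.join(t)) for t in product('ACGT', repeat=3)}
-- ===== Notes on version B (the rewrite author's own statement) =====
-- stated objective: alternative
-- what changed: A keeps one running dict pre-seeded with 64 zero counts and increments it behind a membership test in a single pass; B maintains no counting dict at all: it uppercases the sequence once, materializes the list of overlapping 3-windows, and answers each of the 64 canonical trinucleotides independently by a full scan of that list (list.count).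
import Mathlib
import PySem

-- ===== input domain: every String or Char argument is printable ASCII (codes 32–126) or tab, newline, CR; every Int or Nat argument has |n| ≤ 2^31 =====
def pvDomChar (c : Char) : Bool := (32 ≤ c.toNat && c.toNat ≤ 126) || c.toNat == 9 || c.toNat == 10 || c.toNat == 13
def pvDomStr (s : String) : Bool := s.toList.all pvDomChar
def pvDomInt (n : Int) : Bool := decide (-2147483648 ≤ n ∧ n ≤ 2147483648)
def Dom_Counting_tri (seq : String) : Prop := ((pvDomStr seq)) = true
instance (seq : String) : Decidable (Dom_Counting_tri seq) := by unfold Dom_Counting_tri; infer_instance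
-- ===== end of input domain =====

-- B replaces A's single-pass dict-increment loop with a window list queried per canonical key via list.count (alternative algorithm; no running counter).

-- ===== PORT A =====
def Counting_tri (seq : String) : List (String × Int) :=
  -- tri_nucleotides = [''.join(x) for x in product('ACGT', repeat=3)]
  let triNucleotides : List String :=
    "ACGT".toList.flatMap (fun a =>
      "ACGT".toList.flatMap (fun b =>
        "ACGT".toList.map (fun c => String.ofList [a, b, c])))
  -- tri_count = {tri: 0 for tri in tri_nucleotides}
  let triCount0 : PySem.Dict String Int :=
    triNucleotides.foldl (fun d tri => d.insert tri 0) PySem.Dict.empty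
  -- for i in range(len(sequence) - 2): …
  let final : PySem.Dict String Int :=
    (PySem.List.pyRange 0 ((seq.toList.length : Int) - 2) 1).foldl
      (fun d i =>
        let tri := String.ofList (PySem.Chars.upper (PySem.List.slice seq.toList (some i) (some (i + 3))))
        if d.contains tri then d.modify tri 0 (· + 1) else d)
      triCount0
  final.items

-- ===== PORT B =====
def Counting_tri_alt (seq : String) : List (String × Int) :=
  -- S = seq.upper()
  let S : List Char := PySem.Chars.upper seq.toList
  -- windows = [S[i:i+3] for i in range(len(S) - 2)]
  let windows : List String :=
    (PySem.List.pyRange 0 ((S.length : Int) - 2) 1).map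
      (fun i => String.ofList (PySem.List.slice S (some i) (some (i + 3))))
  -- {''.join(t): windows.count(''.join(t)) for t in product('ACGT', repeat=3)}
  "ACGT".toList.flatMap (fun a =>
    "ACGT".toList.flatMap (fun b =>
      "ACGT".toList.map (fun c => String.ofList [a, b, c])))
  |>.map (fun t => (t, (PySem.List.count windows t : Int)))

-- ===== PRECONDITION & SPEC =====
def Spec_Counting_tri (seq : String) (out : List (String × Int)) : Prop := out = Counting_tri_alt seq
instance (seq : String) (out : List (String × Int)) : Decidable (Spec_Counting_tri seq out) := by unfold Spec_Counting_tri; infer_instance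

-- ===== CLAIM (what is proved, stated in full; the proofs are below) =====
def Claim_equal_Counting_tri : Prop := ∀ (seq : String), Dom_Counting_tri seq → Spec_Counting_tri seq (Counting_tri seq)

-- ===== LEMMAS AND PROOFS =====

-- the 64 canonical trinucleotides, as both ports build them
def pvTris : List String :=
  "ACGT".toList.flatMap (fun a =>
    "ACGT".toList.flatMap (fun b =>
      "ACGT".toList.map (fun c => String.ofList [a, b, c])))

-- the list of uppercased windows of seq (A's order of operations: slice, then upper)
def pvWs (seq : String) : List String :=
  (PySem.List.pyRange 0 ((seq.toList.length : Int) - 2) 1).map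
    (fun i => String.ofList (PySem.Chars.upper (PySem.List.slice seq.toList (some i) (some (i + 3)))))

-- A's seed dict
def pvD0 : PySem.Dict String Int := pvTris.foldl (fun d tri => d.insert tri 0) PySem.Dict.empty

-- A's loop body
def pvStepA (d : PySem.Dict String Int) (w : String) : PySem.Dict String Int :=
  if d.contains w then d.modify w 0 (· + 1) else d

lemma pvStepA_keys (d : PySem.Dict String Int) (w : String) : (pvStepA d w).keys = d.keys := by
  unfold pvStepA
  split_ifs with h
  · rw [PySem.Dict.keys_modify]; exact PySem.Dict.keys_insert_of_contains d _ h
  · rfl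

lemma pvStepA_contains (d : PySem.Dict String Int) (w k : String) :
    (pvStepA d w).contains k = d.contains k := by
  rw [PySem.Dict.contains_eq_decide_mem_keys, PySem.Dict.contains_eq_decide_mem_keys, pvStepA_keys]

lemma pvStepA_getD (d : PySem.Dict String Int) (w k : String) :
    (pvStepA d w).getD k 0 =
      if d.contains w = true ∧ k = w then d.getD w 0 + 1 else d.getD k 0 := by
  unfold pvStepA
  by_cases h1 : d.contains w = true
  · rw [if_pos h1, PySem.Dict.getD_modify]
    by_cases h2 : k = w <;> simp [h1, h2]
  · rw [if_neg h1]
    simp [h1]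

lemma pvLoopA (l : List String) (d : PySem.Dict String Int) :
    ((l.foldl pvStepA d).keys = d.keys) ∧
    (∀ k, (l.foldl pvStepA d).getD k 0 =
      d.getD k 0 + (if d.contains k = true then (l.count k : Int) else 0)) := by
  induction l generalizing d with
  | nil => simp
  | cons w t ih =>
    obtain ⟨ihk, ihg⟩ := ih (pvStepA d w)
    refine ⟨by rw [List.foldl_cons, ihk, pvStepA_keys], ?_⟩
    intro k
    rw [List.foldl_cons, ihg k, pvStepA_contains, pvStepA_getD, List.count_cons]
    by_cases hkw : k = w
    · subst hkw
      by_cases hk : d.contains k = true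
      · simp [hk]; ring
      · simp [hk]
    · simp [hkw, Ne.symm hkw]

set_option maxRecDepth 40000 in
lemma pvD0_facts : pvD0.keys = pvTris ∧ pvD0.keys.Nodup ∧
    ∀ t ∈ pvTris, pvD0.contains t = true ∧ pvD0.getD t 0 = 0 := by
  decide

lemma pvA_eq (seq : String) :
    Counting_tri seq = pvTris.map (fun t => (t, ((pvWs seq).count t : Int))) := by
  have hmain : Counting_tri seq = ((pvWs seq).foldl pvStepA pvD0).items := by
    unfold Counting_tri pvWs pvD0 pvTris pvStepA
    rw [List.foldl_map]
  obtain ⟨hk0, hnd0, hmem⟩ := pvD0_facts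
  obtain ⟨hkeys, hgetD⟩ := pvLoopA (pvWs seq) pvD0
  rw [hmain, PySem.Dict.items_eq_map_keys _ (by rw [hkeys]; exact hnd0) 0, hkeys, hk0]
  apply List.map_congr_left
  intro t ht
  obtain ⟨hc, h0⟩ := hmem t ht
  rw [hgetD t, hc, h0]
  simp

-- upper commutes with slicing: uppercasing the whole sequence first (B) gives the
-- same windows as uppercasing each slice (A); upper is a character-wise map.
lemma pvSlice_upper (l : List Char) (a b : Option Int) :
    PySem.List.slice (PySem.Chars.upper l) a b = PySem.Chars.upper (PySem.List.slice l a b) := by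
  simp [PySem.Chars.upper, PySem.List.slice, PySem.List.clampIdx]

lemma pvB_eq (seq : String) :
    Counting_tri_alt seq = pvTris.map (fun t => (t, ((pvWs seq).count t : Int))) := by
  unfold Counting_tri_alt
  have hlen : ((PySem.Chars.upper seq.toList).length : Int) = (seq.toList.length : Int) := by
    simp [PySem.Chars.upper]
  show pvTris.map _ = _
  apply List.map_congr_left
  intro t _
  simp only [hlen, pvSlice_upper, PySem.List.count_eq, pvWs]

-- ===== VERDICT (by name: the statement is the Claim_ definition above) =====
theorem Counting_tri_spec : Claim_equal_Counting_tri := by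
  intro seq _
  unfold Spec_Counting_tri
  rw [pvA_eq, pvB_eq]
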